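-- pv_equiv track=rewrite | github.com/SalvatoreFerro/etna-monitor-v2 | app/utils/ingv_bands.py | _fill_missing_classes
-- ===== SOURCE A (Python) =====
-- def _fill_missing_classes(classes: list[str | None]) -> list[str | None]:
--     filled = classes[:]
--     last = None
--     for idx, value in enumerate(filled):
--         if value is None and last is not None:
--             filled[idx] = last
--         else:
--             last = value
--     if filled and filled[0] is None:
--         first = next((val for val in filled if val is not None), None)
--         if first is not None:
--             filled = [first if val is None else val for val in filled]
--     return filled
-- ===== SOURCE B (Python) =====
-- def _fill_missing_classes(classes):
--     last = next((v for v in classes if v is not None), None)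
--     result = []
--     for v in classes:
--         if v is not None:
--             last = v
--         result.append(last)
--     return result
-- ===== Notes on version B (the rewrite author's own statement) =====
-- stated objective: simpler
-- what changed: Replaces A's copy-and-mutate forward-fill pass plus a separate conditional backfill pass over leading Nones with a single pass whose carry is seeded by the first non-None value, building a fresh list (no in-place mutation).
import Mathlib
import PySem

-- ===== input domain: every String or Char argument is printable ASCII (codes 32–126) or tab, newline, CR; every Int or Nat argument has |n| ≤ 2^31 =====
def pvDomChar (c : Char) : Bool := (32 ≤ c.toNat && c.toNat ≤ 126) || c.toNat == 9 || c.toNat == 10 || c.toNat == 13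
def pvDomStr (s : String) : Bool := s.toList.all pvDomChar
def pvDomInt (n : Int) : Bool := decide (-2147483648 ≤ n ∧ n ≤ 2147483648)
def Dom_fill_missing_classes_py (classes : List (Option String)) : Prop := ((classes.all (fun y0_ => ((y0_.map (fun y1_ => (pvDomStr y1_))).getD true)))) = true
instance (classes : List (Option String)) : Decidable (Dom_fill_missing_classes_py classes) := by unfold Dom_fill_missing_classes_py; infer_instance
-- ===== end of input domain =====

-- B replaces A's two passes (forward-fill with in-place mutation, then a conditional backfill of leading Nones)
-- by one pass with a carry seeded by the first non-None value; objective: simpler. Return value only (A copies its input).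


-- ===== PORT A =====
-- forward pass: Python iterates over a copy, mutating only the current index,
-- so each read sees the original value; faithful as a carried-state recursion.
def pvFwd : List (Option String) → Option String → List (Option String)
  | [], _ => []
  | v :: rest, last =>
    if v = none ∧ last ≠ none then last :: pvFwd rest last
    else v :: pvFwd rest v

-- next((val for val in filled if val is not None), None)
def pvFirstSome : List (Option String) → Option String
  | [] => none
  | v :: rest => if v ≠ none then v else pvFirstSome rest

def fill_missing_classes_py (classes : List (Option String)) : List (Option String) :=
  let filled := pvFwd classes none
  match filled with
  | [] => filled
  | v0 :: _ =>
    if v0 = none then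
      match pvFirstSome filled with
      | none => filled
      | some s => filled.map (fun val => if val = none then some s else val)
    else filled

-- ===== PORT B =====
-- single pass: carry `last`, seeded with the first non-None value.
def pvAltLoop : List (Option String) → Option String → List (Option String)
  | [], _ => []
  | v :: rest, last =>
    let last' := if v ≠ none then v else last
    last' :: pvAltLoop rest last'

def fill_missing_classes_py_alt (classes : List (Option String)) : List (Option String) :=
  pvAltLoop classes (pvFirstSome classes)

-- ===== PRECONDITION & SPEC =====
def Spec_fill_missing_classes_py (classes : List (Option String)) (out : List (Option String)) : Prop := out = fill_missing_classes_py_alt classes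
instance (classes : List (Option String)) (out : List (Option String)) : Decidable (Spec_fill_missing_classes_py classes out) := by unfold Spec_fill_missing_classes_py; infer_instance

-- ===== CLAIM (what is proved, stated in full; the proofs are below) =====
def Claim_equal_fill_missing_classes_py : Prop := ∀ (classes : List (Option String)), Dom_fill_missing_classes_py classes → Spec_fill_missing_classes_py classes (fill_missing_classes_py classes)

-- ===== LEMMAS AND PROOFS =====


theorem pvFwd_some_eq_alt (r : List (Option String)) (x : String) :
    pvFwd r (some x) = pvAltLoop r (some x) := by
  induction r generalizing x with
  | nil => rfl
  | cons v rest ih =>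
    cases v with
    | none => simp [pvFwd, pvAltLoop, ih]
    | some y => simp [pvFwd, pvAltLoop, ih]

theorem pvMapFill_fwd_some (r : List (Option String)) (x s : String) :
    (pvFwd r (some x)).map (fun val => if val = none then some s else val) =
      pvAltLoop r (some x) := by
  induction r generalizing x with
  | nil => rfl
  | cons v rest ih =>
    cases v with
    | none => simp [pvFwd, pvAltLoop, ih]
    | some y => simp [pvFwd, pvAltLoop, ih]

theorem pvMapFill_fwd_none (r : List (Option String)) (s : String) :
    (pvFwd r none).map (fun val => if val = none then some s else val) =
      pvAltLoop r (some s) := by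
  induction r with
  | nil => rfl
  | cons v rest ih =>
    cases v with
    | none => simp [pvFwd, pvAltLoop, ih]
    | some y => simp [pvFwd, pvAltLoop, pvMapFill_fwd_some]

theorem pvFirstSome_fwd_none (r : List (Option String)) :
    pvFirstSome (pvFwd r none) = pvFirstSome r := by
  induction r with
  | nil => rfl
  | cons v rest ih =>
    cases v with
    | none => simp [pvFwd, pvFirstSome, ih]
    | some y => simp [pvFwd, pvFirstSome]

theorem pvFwd_none_of_allNone (r : List (Option String)) (h : pvFirstSome r = none) :
    pvFwd r none = r := by
  induction r with
  | nil => rfl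
  | cons v rest ih =>
    cases v with
    | none =>
      simp [pvFirstSome] at h
      simp [pvFwd, ih h]
    | some y => simp [pvFirstSome] at h

theorem pvAlt_none_of_allNone (r : List (Option String)) (h : pvFirstSome r = none) :
    pvAltLoop r none = r := by
  induction r with
  | nil => rfl
  | cons v rest ih =>
    cases v with
    | none =>
      simp [pvFirstSome] at h
      simp [pvAltLoop, ih h]
    | some y => simp [pvFirstSome] at h

-- ===== VERDICT (by name: the statement is the Claim_ definition above) =====
theorem fill_missing_classes_py_spec : Claim_equal_fill_missing_classes_py := by
  intro classes _
  unfold Spec_fill_missing_classes_py fill_missing_classes_py fill_missing_classes_py_alt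
  cases classes with
  | nil => rfl
  | cons v rest =>
    cases v with
    | some x =>
      simp [pvFwd, pvFirstSome, pvAltLoop, pvFwd_some_eq_alt]
    | none =>
      have hfwd : pvFwd (none :: rest) none = none :: pvFwd rest none := by
        simp [pvFwd]
      rw [hfwd]
      have hfs : pvFirstSome (none :: pvFwd rest none) = pvFirstSome rest := by
        simp [pvFirstSome, pvFirstSome_fwd_none]
      cases hres : pvFirstSome rest with
      | none =>
        simp only [hfs, hres]
        simp [pvFwd_none_of_allNone rest hres, pvAltLoop, pvFirstSome, hres,
          pvAlt_none_of_allNone rest hres]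
      | some s =>
        simp only [hfs, hres]
        simp [pvMapFill_fwd_none, pvAltLoop, pvFirstSome, hres]
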